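-- pv_equiv track=rewrite | github.com/xmzt/crpy | lexr/chtab.py | chsetDes
-- ===== SOURCE A (Python) =====
-- def chsetDes(chV):
--     orunA = -1
--     orunE = -1
--     accV = []
--     def dump(orunA):
--         if 2 < (orunE - orunA):
--             accV.append(f'{chr(orunA)}-{chr(orunE-1)}')
--         else:
--             while orunA < orunE:
--                 accV.append(f'{chr(orunA)}')
--                 orunA += 1
--
--     for ch in chV:
--         if orunE != (o := ord(ch)):
--             dump(orunA)
--             orunA = o
--         orunE = o + 1
--     dump(orunA)
--     return f'[{"".join(accV)!r}]'
-- ===== SOURCE B (Python) =====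
-- def chsetDes(chV):
--     # staged passes: compute run-boundary indices first, then format slices between them
--     n = len(chV)
--     cuts = [i for i in range(n) if i == 0 or ord(chV[i]) != ord(chV[i - 1]) + 1]
--     cuts.append(n)
--     body = ''.join(
--         chV[a] + '-' + chV[b - 1] if b - a >= 3 else chV[a:b]
--         for a, b in zip(cuts, cuts[1:])
--     )
--     return f'[{body!r}]'
-- ===== Notes on version B (the rewrite author's own statement) =====
-- stated objective: alternative
-- what changed: A is a stateful scan with a closure over two ordinal registers that dumps runs as it goes; B has no run state: a first pass over indices collects the boundary positions where the consecutive-ordinal chain breaks, then the segments between adjacent boundaries are formatted from slices.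
import Mathlib
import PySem

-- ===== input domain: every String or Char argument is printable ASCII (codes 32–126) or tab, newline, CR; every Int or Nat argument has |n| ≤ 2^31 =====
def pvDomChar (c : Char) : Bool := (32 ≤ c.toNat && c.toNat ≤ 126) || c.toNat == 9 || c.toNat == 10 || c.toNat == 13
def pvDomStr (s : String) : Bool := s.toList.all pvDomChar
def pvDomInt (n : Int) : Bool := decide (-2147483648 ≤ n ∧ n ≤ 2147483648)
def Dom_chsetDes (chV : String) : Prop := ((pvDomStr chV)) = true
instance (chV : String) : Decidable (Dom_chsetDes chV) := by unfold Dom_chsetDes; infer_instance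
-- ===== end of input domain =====

-- B replaces A's stateful scan (a closure over two ordinal registers dumping runs as it
-- goes) by two staged passes: collect the boundary indices where the consecutive-ordinal
-- chain breaks, then format the slices between adjacent boundaries.

-- shared helper: Python's repr of a str (f'…!r'), exact on printable ASCII + tab/newline/CR
def pyHexDig (n : Nat) : Char := if n < 10 then Char.ofNat (48 + n) else Char.ofNat (87 + n)

def pyReprChars (cs : List Char) : List Char :=
  let q : Char := if '\'' ∈ cs ∧ ¬ '"' ∈ cs then '"' else '\''
  let body := cs.flatMap (fun c =>
    if c = '\\' then ['\\', '\\']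
    else if c = q then ['\\', q]
    else if c = '\t' then ['\\', 't']
    else if c = '\n' then ['\\', 'n']
    else if c = '\r' then ['\\', 'r']
    else if c.toNat < 32 ∨ c.toNat = 127 then
      ['\\', 'x', pyHexDig (c.toNat / 16 % 16), pyHexDig (c.toNat % 16)]
    else [c])
  q :: body ++ [q]

-- ===== PORT A =====
-- the inner while loop of A's dump closure
def aWhile (orunA orunE : Int) : List (List Char) :=
  if _h : orunA < orunE then [Char.ofNat orunA.toNat] :: aWhile (orunA + 1) orunE else []
termination_by (orunE - orunA).toNat
decreasing_by omega

-- A's dump closure (returns the strings it appends to accV, as char lists)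
def aDump (orunA orunE : Int) : List (List Char) :=
  if 2 < orunE - orunA then [[Char.ofNat orunA.toNat, '-', Char.ofNat (orunE - 1).toNat]]
  else aWhile orunA orunE

-- one iteration of A's for loop; state = (orunA, orunE, accV)
def aStep (st : Int × Int × List (List Char)) (ch : Char) : Int × Int × List (List Char) :=
  let o : Int := ch.toNat
  if st.2.1 ≠ o then (o, o + 1, st.2.2 ++ aDump st.1 st.2.1) else (st.1, o + 1, st.2.2)

def chsetDes (chV : String) : String :=
  let st := chV.toList.foldl aStep (-1, -1, [])
  let body := (st.2.2 ++ aDump st.1 st.2.1).flatten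
  String.ofList ('[' :: pyReprChars body ++ [']'])

-- ===== PORT B =====
-- the boundary predicate of B's first comprehension; indices are always in range in B,
-- so getD's default is never used
def pvCutP (cs : List Char) (i : Nat) : Bool :=
  i == 0 || ((cs.getD i ' ').toNat != (cs.getD (i - 1) ' ').toNat + 1)

def bCuts (cs : List Char) : List Nat :=
  (List.range cs.length).filter (pvCutP cs) ++ [cs.length]

-- B's per-pair formatting; chV[a:b] for 0 ≤ a ≤ b ≤ n is exactly (drop a).take (b-a)
def segFmt (cs : List Char) (a b : Nat) : List Char :=
  if 3 ≤ b - a then [cs.getD a ' ', '-', cs.getD (b - 1) ' '] else (cs.drop a).take (b - a)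

def chsetDes_alt (chV : String) : String :=
  let cs := chV.toList
  let cuts := bCuts cs
  let body := ((cuts.zip cuts.tail).map (fun p => segFmt cs p.1 p.2)).flatten
  String.ofList ('[' :: pyReprChars body ++ [']'])

-- ===== PRECONDITION & SPEC =====
def Spec_chsetDes (chV : String) (out : String) : Prop := out = chsetDes_alt chV
instance (chV : String) (out : String) : Decidable (Spec_chsetDes chV out) := by unfold Spec_chsetDes; infer_instance

-- ===== CLAIM (what is proved, stated in full; the proofs are below) =====
def Claim_equal_chsetDes : Prop := ∀ (chV : String), Dom_chsetDes chV → Spec_chsetDes chV (chsetDes chV)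

-- ===== LEMMAS AND PROOFS =====

-- l is the chars with ordinals a, a+1, …
def ConsecFrom : Nat → List Char → Prop
  | _, [] => True
  | a, c :: rest => c.toNat = a ∧ ConsecFrom (a + 1) rest

-- length of the maximal consecutive-ordinal prefix
def runLen : List Char → Nat
  | [] => 0
  | [_] => 1
  | a :: b :: t => if b.toNat = a.toNat + 1 then runLen (b :: t) + 1 else 1

theorem runLen_pos (cs : List Char) (h : cs ≠ []) : 1 ≤ runLen cs := by
  match cs with
  | [] => exact absurd rfl h
  | [_] => simp [runLen]
  | a :: b :: t => unfold runLen; split_ifs <;> omega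

theorem runLen_le (cs : List Char) : runLen cs ≤ cs.length := by
  match cs with
  | [] => simp [runLen]
  | [_] => simp [runLen]
  | a :: b :: t =>
    have ih := runLen_le (b :: t)
    unfold runLen
    split_ifs <;> simp_all <;> omega

-- decomposition of cs into maximal runs
def runsOf (cs : List Char) : List (List Char) :=
  if h : cs = [] then []
  else cs.take (runLen cs) :: runsOf (cs.drop (runLen cs))
termination_by cs.length
decreasing_by
  have h1 := runLen_pos cs h
  have : 0 < cs.length := List.length_pos_iff.mpr h
  simp [List.length_drop]; omega

-- formatting of one maximal run (runs are nonempty, so defaults are never used)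
def fmtRun (r : List Char) : List Char :=
  if 3 ≤ r.length then [r.headD ' ', '-', r.getLastD ' '] else r

theorem getLast?_some_of_ne_nil {α : Type} (l : List α) (hne : l ≠ []) :
    ∃ x, l.getLast? = some x :=
  Option.isSome_iff_exists.mp (List.getLast?_isSome.mpr hne)

theorem consec_getLast? (l : List Char) : ∀ (a : Nat) (c : Char),
    ConsecFrom a l → l.getLast? = some c → c.toNat + 1 = a + l.length := by
  induction l with
  | nil => intro a c _ h; simp at h
  | cons x rest ih =>
    intro a c hc hl
    cases rest with
    | nil =>
      simp at hl
      subst hl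
      have := hc.1
      simp [this]
    | cons y t =>
      have h2 : (y :: t).getLast? = some c := by simpa using hl
      have := ih (a + 1) c hc.2 h2
      simp at this ⊢
      omega

theorem consec_append (l : List Char) : ∀ (a : Nat) (ch : Char),
    ConsecFrom a l → ch.toNat = a + l.length → ConsecFrom a (l ++ [ch]) := by
  induction l with
  | nil => intro a ch _ h; exact ⟨by simpa using h, trivial⟩
  | cons x rest ih =>
    intro a ch hc hch
    exact ⟨hc.1, ih (a + 1) ch hc.2 (by simp at hch ⊢; omega)⟩

theorem consec_head (l : List Char) (a : Nat) (h : ConsecFrom a l) (hne : l ≠ []) :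
    l.headD ' ' = Char.ofNat a := by
  cases l with
  | nil => exact absurd rfl hne
  | cons c rest =>
    have h1 := h.1
    simp [← h1, Char.ofNat_toNat]

theorem flatten_singletons (l : List Char) : (l.map (fun c => [c])).flatten = l := by
  induction l with
  | nil => rfl
  | cons c rest ih => simp [ih]

theorem aWhile_consec (l : List Char) : ∀ a : Nat,
    ConsecFrom a l → aWhile (a : Int) ((a : Int) + l.length) = l.map (fun c => [c]) := by
  induction l with
  | nil => intro a _; rw [aWhile]; simp
  | cons c rest ih =>
    intro a hc
    rw [aWhile]
    have hlt : (a : Int) < (a : Int) + (c :: rest).length := by simp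
    rw [dif_pos hlt]
    have hhd : Char.ofNat ((a : Int)).toNat = c := by
      rw [Int.toNat_natCast, ← hc.1, Char.ofNat_toNat]
    have harith : ((a : Int) + 1 : Int) = ((a + 1 : Nat) : Int) := by push_cast; ring
    have hlen : ((a : Int) + ((c :: rest).length : Int)) = ((a + 1 : Nat) : Int) + rest.length := by
      simp [List.length]; push_cast; ring
    rw [hhd, harith, hlen, ih (a + 1) hc.2]
    rfl

theorem dump_flatten (l : List Char) (a : Nat) (hne : l ≠ []) (hc : ConsecFrom a l) :
    (aDump (a : Int) ((a : Int) + l.length)).flatten = fmtRun l := by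
  unfold aDump fmtRun
  by_cases h3 : 3 ≤ l.length
  · have hgt : 2 < ((a : Int) + l.length) - (a : Int) := by push_cast; omega
    rw [if_pos hgt, if_pos h3]
    obtain ⟨x, hx⟩ := getLast?_some_of_ne_nil l hne
    have hxv := consec_getLast? l a x hc hx
    have hhead := consec_head l a hc hne
    have hlastD : l.getLastD ' ' = x := by
      rw [List.getLastD_eq_getLast?, hx]; rfl
    have h1 : ((a : Int)).toNat = a := Int.toNat_natCast a
    have h2 : ((a : Int) + (l.length : Int) - 1).toNat = x.toNat := by
      have he : ((a : Int) + (l.length : Int) - 1) = (x.toNat : Int) := by push_cast; omega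
      rw [he, Int.toNat_natCast]
    simp only [List.flatten_cons, List.flatten_nil, List.append_nil]
    rw [h1, h2, Char.ofNat_toNat, hhead, hlastD]
  · have hle : ¬ 2 < ((a : Int) + l.length) - (a : Int) := by push_cast; omega
    rw [if_neg hle, if_neg h3, aWhile_consec l a hc, flatten_singletons]

-- maximal run: runLen of cur ++ l is cur.length when cur is consecutive and l breaks it
theorem runLen_break (cur : List Char) : ∀ (a : Nat) (l : List Char),
    ConsecFrom a cur → cur ≠ [] →
    (∀ y, l.head? = some y → y.toNat ≠ a + cur.length) →
    runLen (cur ++ l) = cur.length := by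
  induction cur with
  | nil => intro a l _ h _; exact absurd rfl h
  | cons x rest ih =>
    intro a l hc _ hbr
    cases rest with
    | nil =>
      cases l with
      | nil => simp [runLen]
      | cons y t =>
        have : y.toNat ≠ a + 1 := hbr y rfl
        have hx := hc.1
        simp only [List.cons_append, List.nil_append, runLen]
        rw [if_neg (by omega)]
        rfl
    | cons z t =>
      have hz : z.toNat = x.toNat + 1 := by
        have := hc.1; have := hc.2.1; omega
      have := ih (a + 1) l hc.2 (by simp)
        (by intro y hy; have h2 := hbr y hy; simp only [List.length_cons] at h2 ⊢; omega)
      simp only [List.cons_append] at this ⊢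
      rw [runLen, if_pos hz, this]
      simp

theorem runsOf_break (cur : List Char) (a : Nat) (l : List Char)
    (hc : ConsecFrom a cur) (hne : cur ≠ [])
    (hbr : ∀ y, l.head? = some y → y.toNat ≠ a + cur.length) :
    runsOf (cur ++ l) = cur :: runsOf l := by
  have hk := runLen_break cur a l hc hne hbr
  rw [runsOf]
  rw [dif_neg (by simp [hne])]
  rw [hk, List.take_left, List.drop_left]

-- ===== A-side: the fold of aStep computes the run decomposition =====
theorem aFold (l : List Char) : ∀ (acc : List (List Char)) (a : Nat) (cur : List Char),
    ConsecFrom a cur → cur ≠ [] →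
    (let st := l.foldl aStep ((a : Int), (a : Int) + cur.length, acc)
     (st.2.2 ++ aDump st.1 st.2.1).flatten)
    = acc.flatten ++ ((runsOf (cur ++ l)).map fmtRun).flatten := by
  induction l with
  | nil =>
    intro acc a cur hc hne
    simp only [List.foldl_nil]
    rw [runsOf_break cur a [] hc hne (by simp)]
    rw [runsOf, dif_pos rfl]
    simp [dump_flatten cur a hne hc]
  | cons ch rest ih =>
    intro acc a cur hc hne
    by_cases hext : ch.toNat = a + cur.length
    · -- run extends: A takes the else branch
      have hcond : ¬ ((a : Int) + (cur.length : Int) ≠ ((ch.toNat : Int))) := by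
        push_cast; omega
      simp only [List.foldl_cons, aStep, hcond, if_false]
      have harith : ((ch.toNat : Int) + 1) = (a : Int) + ((cur ++ [ch]).length : Int) := by
        simp; push_cast; omega
      have hthis := ih acc a (cur ++ [ch]) (consec_append cur a ch hc hext) (by simp)
      simp only at hthis
      rw [← harith] at hthis
      rw [show cur ++ ch :: rest = (cur ++ [ch]) ++ rest by simp]
      exact hthis
    · -- run breaks: dump cur, start the new run [ch]
      have hcond : ((a : Int) + (cur.length : Int) ≠ ((ch.toNat : Int))) := by
        push_cast; omega
      simp only [List.foldl_cons, aStep]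
      rw [if_pos hcond]
      have hthis := ih (acc ++ aDump (a : Int) ((a : Int) + cur.length)) ch.toNat [ch]
        ⟨rfl, trivial⟩ (by simp)
      simp only at hthis
      have h1 : ((([ch] : List Char).length : Nat) : Int) = 1 := by simp
      rw [h1] at hthis
      rw [hthis]
      rw [runsOf_break cur a (ch :: rest) hc hne
        (by intro y hy; simp at hy; subst hy; omega)]
      simp [dump_flatten cur a hne hc]

theorem aBody (cs : List Char) :
    (let st := cs.foldl aStep (-1, -1, [])
     (st.2.2 ++ aDump st.1 st.2.1).flatten)
    = ((runsOf cs).map fmtRun).flatten := by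
  cases cs with
  | nil =>
    rw [runsOf, dif_pos rfl]
    simp only [List.foldl_nil]
    have hd : aDump (-1) (-1) = [] := by
      unfold aDump; rw [if_neg (by omega), aWhile]; simp
    simp [hd]
  | cons c rest =>
    have hd : aDump (-1) (-1) = [] := by
      unfold aDump; rw [if_neg (by omega), aWhile]; simp
    have hcond : ((-1 : Int) ≠ ((c.toNat : Int))) := by omega
    have hthis := aFold rest [] c.toNat [c] ⟨rfl, trivial⟩ (by simp)
    simp only at hthis
    have h1 : ((([c] : List Char).length : Nat) : Int) = 1 := by simp
    rw [h1] at hthis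
    simp only [List.foldl_cons, aStep]
    rw [if_pos hcond, hd, List.append_nil]
    simpa using hthis

-- ===== B-side: the cuts/zip computation also computes the run decomposition =====
theorem getD_drop (cs : List Char) (k i : Nat) (d : Char) :
    (cs.drop k).getD i d = cs.getD (k + i) d := by
  simp [List.getD, List.getElem?_drop]

-- inside the maximal run, every index extends its predecessor
theorem inRun (cs : List Char) : ∀ i, i + 1 < runLen cs →
    (cs.getD (i + 1) ' ').toNat = (cs.getD i ' ').toNat + 1 := by
  match cs with
  | [] => intro i h; simp [runLen] at h
  | [x] => intro i h; simp [runLen] at h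
  | a :: b :: t =>
    intro i h
    rw [runLen] at h
    split_ifs at h with hz
    · cases i with
      | zero => simpa using hz
      | succ j =>
        have := inRun (b :: t) j (by omega)
        simpa using this
    · omega

-- at index runLen the chain breaks (maximality)
theorem breakAt (cs : List Char) (h : runLen cs < cs.length) :
    (cs.getD (runLen cs) ' ').toNat ≠ (cs.getD (runLen cs - 1) ' ').toNat + 1 := by
  match cs with
  | [] => simp [runLen] at h
  | [x] => simp [runLen] at h
  | a :: b :: t =>
    rw [runLen] at h ⊢
    split_ifs with hz
    · have hr1 := runLen_pos (b :: t) (by simp)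
      have hrec := breakAt (b :: t) (by rw [if_pos hz] at h; simpa using h)
      have e1 : (a :: b :: t).getD (runLen (b :: t) + 1) ' ' = (b :: t).getD (runLen (b :: t)) ' ' := by
        simp [List.getD]
      have e2 : (a :: b :: t).getD (runLen (b :: t) + 1 - 1) ' ' = (b :: t).getD (runLen (b :: t) - 1) ' ' := by
        have he : runLen (b :: t) + 1 - 1 = (runLen (b :: t) - 1) + 1 := by omega
        rw [he]; simp [List.getD]
      rw [e1, e2]
      exact hrec
    · simpa using hz

-- the boundary list of cs decomposes: 0, then the boundaries of the rest shifted by runLen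
theorem cuts_decomp (cs : List Char) (h : cs ≠ []) :
    bCuts cs = 0 :: (bCuts (cs.drop (runLen cs))).map (fun x => runLen cs + x) := by
  have hk1 := runLen_pos cs h
  have hkle := runLen_le cs
  have hlpos : 0 < cs.length := List.length_pos_iff.mpr h
  have hm : (cs.drop (runLen cs)).length = cs.length - runLen cs := by simp
  have hn : cs.length = runLen cs + (cs.drop (runLen cs)).length := by omega
  have hrange : List.range cs.length
      = List.range (runLen cs) ++ (List.range (cs.drop (runLen cs)).length).map (runLen cs + ·) := by
    rw [hn, List.range_add]
  have hfirst : (List.range (runLen cs)).filter (pvCutP cs) = [0] := by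
    obtain ⟨k', hk'⟩ : ∃ k', runLen cs = k' + 1 := ⟨runLen cs - 1, by omega⟩
    rw [hk', List.range_succ_eq_map]
    simp only [List.filter_cons]
    have h0 : pvCutP cs 0 = true := by simp [pvCutP]
    rw [if_pos h0]
    congr 1
    rw [List.filter_map, List.filter_eq_nil_iff.mpr, List.map_nil]
    intro j hj
    simp only [List.mem_range] at hj
    have hr := inRun cs j (by omega)
    simp only [Function.comp_apply, pvCutP]
    rw [hr]
    simp
  have hshift : ∀ i ∈ List.range (cs.drop (runLen cs)).length,
      pvCutP cs (runLen cs + i) = pvCutP (cs.drop (runLen cs)) i := by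
    intro i hi
    simp only [List.mem_range] at hi
    cases i with
    | zero =>
      have hb := breakAt cs (by omega)
      simp only [pvCutP, Nat.add_zero]
      have hA : (runLen cs == 0) = false := by simp; omega
      rw [hA]
      simp only [Bool.false_or, beq_self_eq_true, Bool.true_or]
      simpa using hb
    | succ j =>
      have e1 : cs.getD (runLen cs + (j + 1)) ' ' = (cs.drop (runLen cs)).getD (j + 1) ' ' := by
        rw [getD_drop]
      have e2 : cs.getD (runLen cs + (j + 1) - 1) ' ' = (cs.drop (runLen cs)).getD j ' ' := by
        have he : runLen cs + (j + 1) - 1 = runLen cs + j := by omega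
        rw [he, getD_drop]
      simp only [pvCutP]
      have hA : (runLen cs + (j + 1) == 0) = false := by simp
      have hB : (j + 1 == 0) = false := by simp
      have hs : j + 1 - 1 = j := by omega
      rw [hA, hB, hs, e1, e2]
  have hsecond : ((List.range (cs.drop (runLen cs)).length).map (runLen cs + ·)).filter (pvCutP cs)
      = ((List.range (cs.drop (runLen cs)).length).filter (pvCutP (cs.drop (runLen cs)))).map (runLen cs + ·) := by
    rw [List.filter_map]
    congr 1
    exact List.filter_congr (by intro i hi; simpa using hshift i hi)
  show (List.range cs.length).filter (pvCutP cs) ++ [cs.length]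
      = 0 :: (((List.range (cs.drop (runLen cs)).length).filter (pvCutP (cs.drop (runLen cs)))
          ++ [(cs.drop (runLen cs)).length]).map (fun x => runLen cs + x))
  rw [hrange, List.filter_append, hfirst, hsecond, List.map_append]
  simp only [List.map_cons, List.map_nil, List.cons_append, List.nil_append, List.append_assoc]
  rw [← hn]

-- every element after the head of bCuts is positive
theorem cuts_tail_pos (cs : List Char) : ∀ x ∈ (bCuts cs).tail, 1 ≤ x := by
  by_cases h : cs = []
  · subst h; intro x hx; simp [bCuts] at hx
  · rw [cuts_decomp cs h]
    intro x hx
    simp only [List.tail_cons, List.mem_map] at hx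
    obtain ⟨y, _, rfl⟩ := hx
    have := runLen_pos cs h
    omega

-- bCuts always starts with 0
theorem cuts_head (cs : List Char) : ∃ t, bCuts cs = 0 :: t := by
  by_cases h : cs = []
  · subst h; exact ⟨[], rfl⟩
  · exact ⟨_, cuts_decomp cs h⟩

-- shifting both segment bounds by k moves the slice into the dropped list
theorem segFmt_shift (cs : List Char) (k a b : Nat) (hb : 1 ≤ b) :
    segFmt cs (k + a) (k + b) = segFmt (cs.drop k) a b := by
  unfold segFmt
  have hsub : k + b - (k + a) = b - a := by omega
  rw [hsub]
  by_cases h3 : 3 ≤ b - a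
  · rw [if_pos h3, if_pos h3]
    have e1 : cs.getD (k + a) ' ' = (cs.drop k).getD a ' ' := (getD_drop cs k a ' ').symm
    have e2 : cs.getD (k + b - 1) ' ' = (cs.drop k).getD (b - 1) ' ' := by
      have he : k + b - 1 = k + (b - 1) := by omega
      rw [he]; exact (getD_drop cs k (b - 1) ' ').symm
    rw [e1, e2]
  · rw [if_neg h3, if_neg h3]
    have hd : (cs.drop k).drop a = cs.drop (k + a) := by
      rw [List.drop_drop]
    rw [hd]

-- the first segment is the formatted first run
theorem segFmt_first (cs : List Char) (h : cs ≠ []) :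
    segFmt cs 0 (runLen cs) = fmtRun (cs.take (runLen cs)) := by
  have hk1 := runLen_pos cs h
  have hkle := runLen_le cs
  unfold segFmt fmtRun
  have hlen : (cs.take (runLen cs)).length = runLen cs := by simp; omega
  rw [hlen, Nat.sub_zero]
  by_cases h3 : 3 ≤ runLen cs
  · rw [if_pos h3, if_pos h3]
    have e1 : (cs.take (runLen cs)).headD ' ' = cs.getD 0 ' ' := by
      cases cs with
      | nil => exact absurd rfl h
      | cons c t =>
        obtain ⟨k', hk'⟩ : ∃ k', runLen (c :: t) = k' + 1 := ⟨runLen (c :: t) - 1, by omega⟩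
        rw [hk']
        simp [List.getD]
    have e2 : (cs.take (runLen cs)).getLastD ' ' = cs.getD (runLen cs - 1) ' ' := by
      rw [List.getLastD_eq_getLast?, List.getLast?_eq_getElem?, hlen]
      rw [List.getElem?_take_of_lt (by omega)]
      rfl
    rw [e1, e2]
  · rw [if_neg h3, if_neg h3, List.drop_zero]

theorem bBody (cs : List Char) :
    (((bCuts cs).zip (bCuts cs).tail).map (fun p => segFmt cs p.1 p.2)).flatten
    = ((runsOf cs).map fmtRun).flatten := by
  by_cases h : cs = []
  · subst h
    rw [runsOf, dif_pos rfl]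
    rfl
  · have hk1 := runLen_pos cs h
    have hlpos : 0 < cs.length := List.length_pos_iff.mpr h
    have ih := bBody (cs.drop (runLen cs))
    obtain ⟨t', ht'⟩ := cuts_head (cs.drop (runLen cs))
    have hzip : (bCuts cs).zip (bCuts cs).tail
        = (0, runLen cs) :: ((bCuts (cs.drop (runLen cs))).zip (bCuts (cs.drop (runLen cs))).tail).map
            (Prod.map (runLen cs + ·) (runLen cs + ·)) := by
      rw [cuts_decomp cs h, List.tail_cons, ht']
      simp only [List.map_cons, List.zip_cons_cons, Nat.add_zero]
      congr 1
      have hl : (runLen cs :: t'.map (fun x => runLen cs + x))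
          = (0 :: t').map (fun x => runLen cs + x) := by simp
      rw [hl, List.zip_map, List.tail_cons]
    rw [hzip]
    simp only [List.map_cons, List.flatten_cons, List.map_map]
    have hrest : ∀ p ∈ (bCuts (cs.drop (runLen cs))).zip (bCuts (cs.drop (runLen cs))).tail,
        ((fun p => segFmt cs p.1 p.2) ∘ Prod.map (runLen cs + ·) (runLen cs + ·)) p
        = segFmt (cs.drop (runLen cs)) p.1 p.2 := by
      intro p hp
      have hmem := (List.of_mem_zip hp).2
      have hbpos := cuts_tail_pos (cs.drop (runLen cs)) p.2 hmem
      simp only [Function.comp, Prod.map]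
      exact segFmt_shift cs (runLen cs) p.1 p.2 hbpos
    rw [List.map_congr_left hrest, ih, segFmt_first cs h]
    conv_rhs => rw [runsOf, dif_neg h]
    simp
termination_by cs.length
decreasing_by
  have := runLen_pos cs h
  have : 0 < cs.length := List.length_pos_iff.mpr h
  simp
  omega

-- ===== VERDICT (by name: the statement is the Claim_ definition above) =====
theorem chsetDes_spec : Claim_equal_chsetDes := by
  intro chV _
  unfold Spec_chsetDes
  have hA := aBody chV.toList
  have hB := bBody chV.toList
  simp only at hA
  simp only [chsetDes, chsetDes_alt]
  rw [hA, ← hB]
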